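-- pv_equiv track=rewrite | github.com/heyingge-1560733/cse415 | a4_starter_code/heyingge_TTS_agent.py | static_eval_helper
-- ===== SOURCE A (Python) =====
-- def static_eval_helper(list, k):
--     W = 0
--     B = 0
--     for square in list:
--         if square == '-':
--             break
--         if square == 'W':
--             W += 1
--         if square == 'B':
--             B += 1
--     if W == k and B == 0:
--         return 0
--     elif W == 0 and B == k:
--         return 1
--     else:
--         return 2
-- ===== SOURCE B (Python) =====
-- def _uniform(squares, good, bad, budget):
--     # True iff the segment before the first '-' contains no `bad` square
--     # and exactly `budget` occurrences of `good`.  Early-exits on `bad`.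
--     for s in squares:
--         if s == '-':
--             break
--         if s == bad:
--             return False
--         if s == good:
--             budget -= 1
--     return budget == 0
--
-- def static_eval_helper(list, k):
--     if _uniform(list, 'W', 'B', k):
--         return 0
--     if _uniform(list, 'B', 'W', k):
--         return 1
--     return 2
-- ===== Notes on version B (the rewrite author's own statement) =====
-- stated objective: alternative
-- what changed: Replaced the single pass that accumulates two counters and then compares them by two independent early-exit predicate passes, each checking directly (via a decrementing budget, no counters or final count comparison) whether the pre-'-' segment is exactly k of one colour with none of the other.
import Mathlib
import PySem

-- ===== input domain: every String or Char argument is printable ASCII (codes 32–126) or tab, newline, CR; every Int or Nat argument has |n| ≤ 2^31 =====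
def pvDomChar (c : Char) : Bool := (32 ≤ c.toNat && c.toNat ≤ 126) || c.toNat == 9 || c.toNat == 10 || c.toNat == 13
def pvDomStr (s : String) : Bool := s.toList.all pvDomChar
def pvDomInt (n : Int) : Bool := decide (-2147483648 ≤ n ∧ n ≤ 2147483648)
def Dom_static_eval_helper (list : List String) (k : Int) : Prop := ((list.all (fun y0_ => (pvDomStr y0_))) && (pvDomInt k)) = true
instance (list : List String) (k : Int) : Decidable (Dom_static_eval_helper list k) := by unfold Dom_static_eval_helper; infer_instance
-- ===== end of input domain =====

-- B replaces A's dual-counter pass+final comparison by two early-exit predicate passes, each checking with a decrementing budget whether the pre-'-' segment is exactly k of one colour and none of the other (alternative decomposition, same cost).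


-- ===== PORT A =====
-- the for-loop with break, carrying the two counters W and B
def sehLoop : List String → Int → Int → Int × Int
  | [], W, B => (W, B)
  | square :: rest, W, B =>
    if square = "-" then (W, B)
    else sehLoop rest (if square = "W" then W + 1 else W) (if square = "B" then B + 1 else B)

def static_eval_helper (list : List String) (k : Int) : Int :=
  let WB := sehLoop list 0 0
  if WB.1 = k ∧ WB.2 = 0 then 0
  else if WB.1 = 0 ∧ WB.2 = k then 1
  else 2

-- ===== PORT B =====
-- _uniform: early-exit predicate pass with a decrementing budget
def sehUniform : List String → String → String → Int → Bool
  | [], _, _, budget => budget == 0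
  | s :: rest, good, bad, budget =>
    if s = "-" then budget == 0
    else if s = bad then false
    else sehUniform rest good bad (if s = good then budget - 1 else budget)

def static_eval_helper_alt (list : List String) (k : Int) : Int :=
  if sehUniform list "W" "B" k then 0
  else if sehUniform list "B" "W" k then 1
  else 2

-- ===== PRECONDITION & SPEC =====
def Spec_static_eval_helper (list : List String) (k : Int) (out : Int) : Prop := out = static_eval_helper_alt list k
instance (list : List String) (k : Int) (out : Int) : Decidable (Spec_static_eval_helper list k out) := by unfold Spec_static_eval_helper; infer_instance

-- ===== CLAIM =====
def Claim_equal_static_eval_helper : Prop := ∀ (list : List String) (k : Int), Dom_static_eval_helper list k → Spec_static_eval_helper list k (static_eval_helper list k)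

-- ===== LEMMAS AND PROOFS =====

theorem sehLoop_eq_counts (l : List String) (W B : Int) :
    sehLoop l W B =
      (W + ((l.takeWhile (fun s => s ≠ "-")).count "W" : Int),
       B + ((l.takeWhile (fun s => s ≠ "-")).count "B" : Int)) := by
  induction l generalizing W B with
  | nil => simp [sehLoop]
  | cons s rest ih =>
    by_cases hs : s = "-"
    · simp [sehLoop, hs, List.takeWhile]
    · rw [List.takeWhile_cons_of_pos (by simp [hs])]
      simp only [sehLoop, if_neg hs]
      rw [ih]
      simp only [List.count_cons, Prod.mk.injEq]
      constructor <;> split_ifs <;> simp_all <;> omega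

theorem sehUniform_iff (l : List String) (good bad : String) (hgb : good ≠ bad) (budget : Int) :
    sehUniform l good bad budget = true ↔
      ((l.takeWhile (fun s => s ≠ "-")).count bad = 0 ∧
       (((l.takeWhile (fun s => s ≠ "-")).count good : Int) = budget)) := by
  induction l generalizing budget with
  | nil => simp [sehUniform]; omega
  | cons s rest ih =>
    by_cases hs : s = "-"
    · simp [sehUniform, hs, List.takeWhile]; omega
    · rw [List.takeWhile_cons_of_pos (by simp [hs])]
      simp only [sehUniform, if_neg hs]
      by_cases hb : s = bad
      · simp [hb, List.count_cons_self]
      · rw [if_neg hb, ih]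
        by_cases hg : s = good
        · subst hg
          rw [if_pos rfl, List.count_cons_self,
            List.count_cons_of_ne hb]
          constructor <;> rintro ⟨h1, h2⟩ <;> exact ⟨h1, by push_cast at *; omega⟩
        · rw [if_neg hg, List.count_cons_of_ne hb,
            List.count_cons_of_ne hg]

-- ===== VERDICT =====
theorem static_eval_helper_spec : Claim_equal_static_eval_helper := by
  intro list k _
  unfold Spec_static_eval_helper static_eval_helper static_eval_helper_alt
  rw [sehLoop_eq_counts]
  have hW := sehUniform_iff list "W" "B" (by decide) k
  have hB := sehUniform_iff list "B" "W" (by decide) k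
  simp only [hW, hB]
  split_ifs <;> push_cast at * <;> omega
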